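-- pv_equiv track=rewrite | github.com/AiswaryaaRajesh/Hackerrank | Validating Credit Card Numbers.py | conschk
-- ===== SOURCE A (Python) =====
-- def conschk(spleng):
--     newnum=''.join(spleng)
--     k=4
--     nchk=0
--     for i in range(len(newnum)-k+1):
--         if (newnum[i]==newnum[i+1]==newnum[i+2]==newnum[i+3]):
--             pass
--         else:
--             nchk+=1
--     if (nchk==13 or nchk==16):
--         return True
--     else:
--         return False
-- ===== SOURCE B (Python) =====
-- def conschk(spleng):
--     s = ''.join(spleng)
--     run = 0
--     prev = None
--     eq = 0
--     for ch in s: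
--         run = run + 1 if ch == prev else 1
--         if run >= 4:
--             eq += 1
--         prev = ch
--     nchk = max(0, len(s) - 3) - eq
--     return nchk == 13 or nchk == 16
-- ===== Notes on version B (the rewrite author's own statement) =====
-- stated objective: faster
-- what changed: B replaces A's per-index check of every length-4 window (four indexed string lookups per position) by a single left-to-right pass maintaining the current run length of equal characters, counting all-equal windows as positions where the run reaches 4 and subtracting from the total window count.
import Mathlib
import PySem

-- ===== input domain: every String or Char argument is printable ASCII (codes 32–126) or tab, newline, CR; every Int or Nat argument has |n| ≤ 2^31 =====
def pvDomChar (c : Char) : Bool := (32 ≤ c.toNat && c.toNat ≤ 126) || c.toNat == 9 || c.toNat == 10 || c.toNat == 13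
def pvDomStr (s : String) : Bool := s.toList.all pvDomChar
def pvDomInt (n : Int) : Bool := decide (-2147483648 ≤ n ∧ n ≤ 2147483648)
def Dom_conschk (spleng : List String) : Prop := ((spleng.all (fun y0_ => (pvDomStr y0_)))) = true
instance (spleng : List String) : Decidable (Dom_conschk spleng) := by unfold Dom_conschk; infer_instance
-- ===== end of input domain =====

-- B replaces A's per-index length-4 window scan (four indexed lookups per position) by a single
-- pass maintaining the current run length of equal characters (objective: faster by constant factor).

-- ===== PORT A =====
def conschk (spleng : List String) : Bool :=
  let newnum := PySem.Str.join "" spleng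
  let k : Int := 4
  let nchk : Int :=
    (PySem.List.pyRange 0 (PySem.Str.len newnum - k + 1) 1).foldl
      (fun nchk i =>
        if PySem.Str.pyGet? newnum i = PySem.Str.pyGet? newnum (i + 1) ∧
           PySem.Str.pyGet? newnum (i + 1) = PySem.Str.pyGet? newnum (i + 2) ∧
           PySem.Str.pyGet? newnum (i + 2) = PySem.Str.pyGet? newnum (i + 3)
        then nchk
        else nchk + 1) 0
  if nchk = 13 ∨ nchk = 16 then true else false

-- ===== PORT B =====
def conschk_alt (spleng : List String) : Bool :=
  let s := PySem.Str.join "" spleng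
  let st :=
    s.toList.foldl
      (fun (st : Nat × Option Char × Nat) ch =>
        let run := if some ch = st.2.1 then st.1 + 1 else 1
        let eq := if 4 ≤ run then st.2.2 + 1 else st.2.2
        (run, some ch, eq))
      (0, none, 0)
  let nchk : Int := max 0 (PySem.Str.len s - 3) - (st.2.2 : Int)
  decide (nchk = 13 ∨ nchk = 16)

-- ===== PRECONDITION & SPEC =====
def Spec_conschk (spleng : List String) (out : Bool) : Prop := out = conschk_alt spleng
instance (spleng : List String) (out : Bool) : Decidable (Spec_conschk spleng out) := by unfold Spec_conschk; infer_instance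

-- ===== CLAIM (what is proved, stated in full; the proofs are below) =====
def Claim_equal_conschk : Prop := ∀ (spleng : List String), Dom_conschk spleng → Spec_conschk spleng (conschk spleng)

-- ===== LEMMAS AND PROOFS =====

-- whether the first four characters exist and are all equal
def win4 : List Char → Bool
  | a :: b :: c :: d :: _ => decide (a = b ∧ b = c ∧ c = d)
  | _ => false

-- number of length-4 all-equal windows of a char list
def eqc : List Char → Nat
  | [] => 0
  | a :: t => (if win4 (a :: t) then 1 else 0) + eqc t

-- A's window predicate at index i (all four lookups succeed and agree)
def winP (l : List Char) (i : Nat) : Bool :=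
  decide (l[i]? = l[i + 1]? ∧ l[i + 1]? = l[i + 2]? ∧ l[i + 2]? = l[i + 3]?)

theorem win4_length {l : List Char} (h : win4 l = true) : 4 ≤ l.length := by
  match l with
  | a :: b :: c :: d :: r => simp
  | [] | [_] | [_, _] | [_, _, _] => simp [win4] at h

theorem eqc_small : (l : List Char) → l.length ≤ 3 → eqc l = 0
  | [], _ => rfl
  | a :: t, h => by
    have hlen : t.length ≤ 2 := by simp at h; omega
    have hw : win4 (a :: t) = false := by
      cases hh : win4 (a :: t)
      · rfl
      · have := win4_length hh; simp at this; omega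
    have ht := eqc_small t (by omega)
    simp [eqc, hw, ht]

theorem eqc_le : (l : List Char) → eqc l ≤ l.length - 3
  | [] => le_refl _
  | a :: t => by
    have ih := eqc_le t
    cases hw : win4 (a :: t) with
    | true =>
      have h4 := win4_length hw
      simp only [List.length_cons] at h4
      simp only [eqc, hw, if_true, List.length_cons]
      omega
    | false =>
      simp only [eqc, hw, Bool.false_eq_true, if_false, List.length_cons]
      omega

theorem winP_shift (a : Char) (t : List Char) (i : Nat) :
    winP (a :: t) (i + 1) = winP t i := by
  unfold winP
  rw [show i + 1 + 1 = (i + 1) + 1 from rfl, show i + 1 + 2 = (i + 2) + 1 from rfl,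
      show i + 1 + 3 = (i + 3) + 1 from rfl]
  simp only [List.getElem?_cons_succ]
  rfl

theorem winP_zero (l : List Char) (h : 3 < l.length) : winP l 0 = win4 l := by
  match l with
  | a :: b :: c :: d :: r => simp [winP, win4]
  | [] | [_] | [_, _] | [_, _, _] => simp at h

theorem countP_win_eq_eqc : (l : List Char) →
    (List.range (l.length - 3)).countP (fun i => winP l i) = eqc l := by
  intro l
  induction l with
  | nil => rfl
  | cons a t ih =>
    by_cases h3 : 3 ≤ t.length
    · have hlen : (a :: t).length - 3 = (t.length - 3) + 1 := by simp; omega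
      rw [hlen, List.range_succ_eq_map, List.countP_cons, List.countP_map]
      have hshift : ((fun i => winP (a :: t) i) ∘ Nat.succ) = fun i => winP t i := by
        funext i
        simp only [Function.comp_apply, Nat.succ_eq_add_one, winP_shift]
      rw [hshift, ih, winP_zero (a :: t) (by simp; omega)]
      simp only [eqc]
      cases hw : win4 (a :: t) <;> simp <;> omega
    · have hlen : (a :: t).length - 3 = 0 := by simp; omega
      rw [hlen]
      have hw : win4 (a :: t) = false := by
        cases hh : win4 (a :: t)
        · rfl
        · have := win4_length hh; simp at this; omega
      have ht : eqc t = 0 := eqc_small t (by omega)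
      simp [eqc, hw, ht]

theorem foldl_not_count (p : Nat → Bool) (xs : List Nat) :
    ∀ c : Int, xs.foldl (fun acc i => if p i then acc else acc + 1) c
      = c + (xs.countP (fun i => ! p i) : Int) := by
  induction xs with
  | nil => simp
  | cons x t ih =>
    intro c
    simp only [List.foldl_cons, List.countP_cons, ih]
    by_cases h : p x = true <;> simp [h] <;> push_cast <;> ring

-- B-side: the scan continued from a run of `run` copies of `p`
def scanEq : Nat → Char → List Char → Nat
  | _, _, [] => 0
  | run, p, c :: t =>
    let run' := if c = p then run + 1 else 1
    (if 4 ≤ run' then 1 else 0) + scanEq run' c t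

theorem win4_cons_ne (p c : Char) (t : List Char) (h : p ≠ c) :
    win4 (p :: c :: t) = false := by
  match t with
  | [] => rfl
  | [_] => rfl
  | u :: u2 :: v => simp [win4, h]

theorem eqc_small_prefix (p c : Char) (t : List Char) (hne : c ≠ p) :
    ∀ k, k ≤ 3 → eqc (List.replicate k p ++ c :: t) = eqc (c :: t) := by
  have hpc : p ≠ c := fun h => hne h.symm
  have h1 : win4 (p :: c :: t) = false := win4_cons_ne p c t hpc
  have h2 : win4 (p :: p :: c :: t) = false := by
    match t with
    | [] => rfl
    | u :: v => simp [win4, hpc]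
  have h3 : win4 (p :: p :: p :: c :: t) = false := by simp [win4, hpc]
  intro k hk
  interval_cases k
  · simp
  · simp [List.replicate, eqc, h1]
  · simp [List.replicate, eqc, h1, h2]
  · simp [List.replicate, eqc, h1, h2, h3]

theorem scanEq_eq_eqc (t : List Char) : ∀ (run : Nat) (p : Char),
    scanEq run p t = eqc (List.replicate (min run 3) p ++ t) := by
  induction t with
  | nil =>
    intro run p
    simp only [scanEq, List.append_nil]
    exact (eqc_small _ (by simp)).symm
  | cons c t ih =>
    intro run p
    by_cases hc : c = p
    · subst hc
      simp only [scanEq, if_true]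
      rw [ih (run + 1) c]
      by_cases h3 : 3 ≤ run
      · have hm : min run 3 = 3 := by omega
        have hm' : min (run + 1) 3 = 3 := by omega
        rw [if_pos (by omega : 4 ≤ run + 1), hm, hm']
        show 1 + eqc (c :: c :: c :: t) = eqc (c :: c :: c :: c :: t)
        simp [eqc, win4]
      · have hm : min run 3 = run := by omega
        have hm' : min (run + 1) 3 = run + 1 := by omega
        rw [if_neg (by omega : ¬ 4 ≤ run + 1), hm, hm']
        have he : List.replicate run c ++ c :: t = List.replicate (run + 1) c ++ t := by
          rw [List.replicate_succ']; simp
        rw [he]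
        omega
    · simp only [scanEq]
      rw [if_neg hc, if_neg (by omega : ¬ (4 : Nat) ≤ 1), ih 1 c]
      rw [eqc_small_prefix p c t hc (min run 3) (min_le_right _ _)]
      have hrep : List.replicate (min 1 3) c ++ t = c :: t := by norm_num [List.replicate]
      rw [hrep]
      omega

def stepB (st : Nat × Option Char × Nat) (ch : Char) : Nat × Option Char × Nat :=
  (if some ch = st.2.1 then st.1 + 1 else 1, some ch,
   if 4 ≤ (if some ch = st.2.1 then st.1 + 1 else 1) then st.2.2 + 1 else st.2.2)

theorem foldB_some (t : List Char) : ∀ (run : Nat) (p : Char) (e : Nat),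
    (t.foldl stepB (run, some p, e)).2.2 = e + scanEq run p t := by
  induction t with
  | nil => intro run p e; simp [scanEq]
  | cons c t ih =>
    intro run p e
    simp only [List.foldl_cons, stepB, scanEq]
    by_cases hc : c = p
    · rw [hc, if_pos (rfl : some p = some p), if_pos (rfl : p = p), ih]
      split_ifs <;> omega
    · rw [if_neg (show ¬ some c = some p by simpa using hc), if_neg hc,
          if_neg (by omega : ¬ (4 : Nat) ≤ 1), if_neg (by omega : ¬ (4 : Nat) ≤ 1), ih]
      omega

theorem foldB_eq_eqc (l : List Char) : (l.foldl stepB (0, none, 0)).2.2 = eqc l := by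
  cases l with
  | nil => rfl
  | cons c t =>
    simp only [List.foldl_cons, stepB]
    rw [if_neg (show ¬ some c = none by simp), if_neg (by omega : ¬ (4 : Nat) ≤ 1)]
    rw [foldB_some t 1 c 0, scanEq_eq_eqc t 1 c]
    have hrep : List.replicate (min 1 3) c ++ t = c :: t := by norm_num [List.replicate]
    rw [hrep]
    omega

-- ===== VERDICT (by name: the statement is the Claim_ definition above) =====
theorem countP_split (p : Nat → Bool) : (xs : List Nat) →
    xs.countP p + xs.countP (fun i => ! p i) = xs.length
  | [] => rfl
  | x :: t => by
    have ih := countP_split p t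
    simp only [List.countP_cons, List.length_cons]
    cases h : p x <;> simp [h] <;> omega

theorem countP_not_win (l : List Char) :
    (List.range (l.length - 3)).countP (fun i => ! winP l i) = (l.length - 3) - eqc l := by
  have h := countP_split (fun i => winP l i) (List.range (l.length - 3))
  rw [List.length_range, countP_win_eq_eqc l] at h
  omega

theorem foldA_eq (s : String) :
    (PySem.List.pyRange 0 (PySem.Str.len s - 4 + 1) 1).foldl
      (fun nchk i =>
        if PySem.Str.pyGet? s i = PySem.Str.pyGet? s (i + 1) ∧
           PySem.Str.pyGet? s (i + 1) = PySem.Str.pyGet? s (i + 2) ∧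
           PySem.Str.pyGet? s (i + 2) = PySem.Str.pyGet? s (i + 3)
        then nchk else nchk + 1) (0 : Int)
    = ((s.toList.length - 3 - eqc s.toList : Nat) : Int) := by
  have hlen : PySem.Str.len s = (s.toList.length : Int) := by simp [PySem.Str.len_eq]
  rw [hlen, PySem.List.pyRange_one]
  have h1 : ((s.toList.length : Int) - 4 + 1 - 0).toNat = s.toList.length - 3 := by omega
  rw [h1, List.foldl_map]
  have hstep : (List.range (s.toList.length - 3)).foldl
      (fun (nchk : Int) (k : Nat) =>
        if PySem.Str.pyGet? s (0 + (k : Int)) = PySem.Str.pyGet? s (0 + (k : Int) + 1) ∧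
           PySem.Str.pyGet? s (0 + (k : Int) + 1) = PySem.Str.pyGet? s (0 + (k : Int) + 2) ∧
           PySem.Str.pyGet? s (0 + (k : Int) + 2) = PySem.Str.pyGet? s (0 + (k : Int) + 3)
        then nchk else nchk + 1) (0 : Int)
      = (List.range (s.toList.length - 3)).foldl
        (fun nchk k => if winP s.toList k then nchk else nchk + 1) (0 : Int) := by
    apply PySem.List.foldl_congr_mem
    intro acc k _
    have e1 : (0 : Int) + (k : Int) = ((k : Nat) : Int) := by push_cast; ring
    rw [e1]
    have e2 : (k : Int) + 1 = ((k + 1 : Nat) : Int) := by push_cast; ring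
    have e3 : (k : Int) + 2 = ((k + 2 : Nat) : Int) := by push_cast; ring
    have e4 : (k : Int) + 3 = ((k + 3 : Nat) : Int) := by push_cast; ring
    rw [e2, e3, e4]
    simp only [PySem.Str.pyGet?_natCast, winP, decide_eq_true_eq]
  rw [hstep, foldl_not_count (fun k => winP s.toList k) _ 0, countP_not_win s.toList]
  simp

theorem conschk_spec : Claim_equal_conschk := by
  intro spleng _
  unfold Spec_conschk conschk conschk_alt
  dsimp only
  set s := PySem.Str.join "" spleng with hs
  have hlen : PySem.Str.len s = (s.toList.length : Int) := by simp [PySem.Str.len_eq]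
  rw [foldA_eq s]
  rw [show (fun (st : Nat × Option Char × Nat) (ch : Char) =>
        ((if some ch = st.2.1 then st.1 + 1 else 1 : Nat), some ch,
         (if 4 ≤ (if some ch = st.2.1 then st.1 + 1 else 1) then st.2.2 + 1 else st.2.2 : Nat)))
      = stepB from rfl, foldB_eq_eqc s.toList]
  have hmax : max 0 (PySem.Str.len s - 3) = ((s.toList.length - 3 : Nat) : Int) := by
    rw [hlen]; omega
  rw [hmax]
  have heqI : ((s.toList.length - 3 : Nat) : Int) - (eqc s.toList : Int)
      = ((s.toList.length - 3 - eqc s.toList : Nat) : Int) := by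
    have := eqc_le s.toList
    omega
  rw [heqI]
  split_ifs with h
  · exact (decide_eq_true h).symm
  · exact (decide_eq_false h).symm
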